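-- pv_equiv track=rewrite | github.com/beauvilerobed/algo_practice | find_k_small_and_large/find_k_smallest.py | k_smallest
-- ===== SOURCE A (Python) =====
-- from heapq import heapify, heappop
--
-- def k_smallest(nums, k):
--     nums = set(nums)
--     nums = list(nums)
--     heapify(nums)
--
--     if len(nums) < k:
--         return None
--
--     min = float("inf")
--     for _ in range(k):
--         min = heappop(nums)
--
--     return min
-- ===== SOURCE B (Python) =====
-- def k_smallest(nums, k):
--     vals = sorted(set(nums))
--     if k <= len(vals):
--         return vals[k - 1]
--     return None
-- ===== Notes on version B (the rewrite author's own statement) =====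
-- stated objective: simpler
-- what changed: Replaces the heapify + k successive heappops over the deduplicated values by sorting the deduplicated values once and indexing the (k-1)-th element directly.
-- outside the precondition, e.g. on k_smallest([1, 2], 0): A returns inf, B returns 2
import Mathlib
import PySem

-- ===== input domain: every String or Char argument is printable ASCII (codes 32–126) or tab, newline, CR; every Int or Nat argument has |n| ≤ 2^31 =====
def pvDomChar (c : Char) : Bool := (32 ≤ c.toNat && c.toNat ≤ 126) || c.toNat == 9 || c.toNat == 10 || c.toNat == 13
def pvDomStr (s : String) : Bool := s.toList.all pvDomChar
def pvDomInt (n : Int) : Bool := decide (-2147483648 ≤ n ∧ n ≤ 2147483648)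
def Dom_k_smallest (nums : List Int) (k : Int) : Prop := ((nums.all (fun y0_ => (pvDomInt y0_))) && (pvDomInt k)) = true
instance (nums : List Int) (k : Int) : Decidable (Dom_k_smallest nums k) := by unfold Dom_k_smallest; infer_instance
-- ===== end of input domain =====

-- B replaces A's heapify + k successive heappops over the deduplicated values by
-- sorting the deduplicated values once and indexing the (k-1)-th element (simpler).


-- ===== PORT A =====
-- One heappop: heappop returns the minimum of the heap and removes that one element;
-- the heap's internal array layout never reaches the returned values, so a pop is
-- ported exactly as "take the minimum, remove one occurrence of it".  The running
-- `min` starts at float("inf"), which is no Int: it is modelled as `none` (Pre_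
-- keeps k ≥ 1, where it is always overwritten before being returned).
def pvHeapPopStep (st : Option Int × List Int) : Option Int × List Int :=
  match PySem.List.min? st.2 (fun x => x) with
  | some m => (some m, ((PySem.List.remove? st.2 m).getD st.2))
  | none => st

def k_smallest (nums : List Int) (k : Int) : Option Int :=
  let heap := PySem.Set.ofList nums
  if (heap.length : Int) < k then none
  else ((List.range k.toNat).foldl (fun st _ => pvHeapPopStep st) (none, heap)).1

-- ===== PORT B =====
def k_smallest_alt (nums : List Int) (k : Int) : Option Int :=
  let vals := PySem.List.sorted (PySem.Set.ofList nums) (fun x => x) false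
  if k ≤ (vals.length : Int) then PySem.List.pyGet? vals (k - 1)
  else none

-- ===== PRECONDITION & SPEC =====
-- Pre_ excludes k ≤ 0, where A's loop body never runs and A returns the float
-- inf — not a value of the declared Optional[int] return type.
def Pre_k_smallest (nums : List Int) (k : Int) : Prop := 1 ≤ k
instance (nums : List Int) (k : Int) : Decidable (Pre_k_smallest nums k) := by unfold Pre_k_smallest; infer_instance
def pvWitness_k_smallest : List Int × Int := ([3, 1, 2, 1], 2)

def Spec_k_smallest (nums : List Int) (k : Int) (out : Option Int) : Prop := out = k_smallest_alt nums k
instance (nums : List Int) (k : Int) (out : Option Int) : Decidable (Spec_k_smallest nums k out) := by unfold Spec_k_smallest; infer_instance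

-- ===== CLAIM (what is proved, stated in full; the proofs are below) =====
def Claim_equal_k_smallest : Prop := ∀ (nums : List Int) (k : Int), Dom_k_smallest nums k → Pre_k_smallest nums k → Spec_k_smallest nums k (k_smallest nums k)

-- ===== LEMMAS AND PROOFS =====

-- One pop from a list whose sorted order is m :: t: yields m, and the remaining
-- elements sort to t.
theorem pvHeapPopStep_sorted (l : List Int) (m : Int) (t : List Int) (st0 : Option Int)
    (h : PySem.List.sorted l (fun x => x) false = m :: t) :
    pvHeapPopStep (st0, l) = (some m, l.erase m) ∧
      PySem.List.sorted (l.erase m) (fun x => x) false = t := by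
  have hperm : (m :: t).Perm l := h ▸ PySem.List.sorted_perm l (fun x => x) false
  have hml : m ∈ l := hperm.mem_iff.mp (by simp)
  have hne : l ≠ [] := by intro e; rw [e] at hperm; exact absurd hperm.length_eq (by simp)
  have hmin : PySem.List.min? l (fun x => x) = some m := by
    obtain ⟨m0, hm0⟩ : ∃ m0, PySem.List.min? l (fun x => x) = some m0 := by
      cases hm : PySem.List.min? l (fun x => x) with
      | none => exact absurd ((PySem.List.min?_eq_none_iff l _).mp hm) hne
      | some v => exact ⟨v, rfl⟩
    have h1 : m ≤ m0 := PySem.List.key_head_sorted_le l (fun x => x) h m0 (PySem.List.min?_mem hm0)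
    have h2 : m0 ≤ m := PySem.List.min?_isMin hm0 m hml
    rw [hm0]; exact congrArg some (le_antisymm h2 h1)
  have hrem : PySem.List.remove? l m = some (l.erase m) :=
    PySem.List.remove?_eq_some_erase l m hml
  have hperm' : t.Perm (l.erase m) := by
    simpa using hperm.erase m
  refine ⟨by simp [pvHeapPopStep, hmin, hrem], ?_⟩
  have hpw : (m :: t).Pairwise (fun a b => a ≤ b) := by
    have := PySem.List.sorted_pairwise l (fun x => x)
    rwa [h] at this
  exact PySem.List.sorted_id_eq_of_perm_of_pairwise _ _ hperm' (List.Pairwise.of_cons hpw)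

-- After n+1 pops (n+1 ≤ |l|), the running minimum is sorted(l)[n].
theorem pvIterate_sorted (n : Nat) (l : List Int) (st0 : Option Int)
    (hlen : n + 1 ≤ l.length) :
    (pvHeapPopStep^[n + 1] (st0, l)).1 =
      (PySem.List.sorted l (fun x => x) false)[n]? := by
  induction n generalizing l st0 with
  | zero =>
    have hne : l ≠ [] := by intro e; subst e; simp at hlen
    obtain ⟨m, t, h⟩ : ∃ m t, PySem.List.sorted l (fun x => x) false = m :: t := by
      cases hs : PySem.List.sorted l (fun x => x) false with
      | nil => exact absurd ((PySem.List.sorted_eq_nil_iff l _ false).mp hs) hne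
      | cons a b => exact ⟨a, b, rfl⟩
    simp [h, (pvHeapPopStep_sorted l m t st0 h).1]
  | succ n ih =>
    have hne : l ≠ [] := by intro e; subst e; simp at hlen
    obtain ⟨m, t, h⟩ : ∃ m t, PySem.List.sorted l (fun x => x) false = m :: t := by
      cases hs : PySem.List.sorted l (fun x => x) false with
      | nil => exact absurd ((PySem.List.sorted_eq_nil_iff l _ false).mp hs) hne
      | cons a b => exact ⟨a, b, rfl⟩
    obtain ⟨h1, h2⟩ := pvHeapPopStep_sorted l m t st0 h
    have hlt : t.length + 1 = l.length := by
      have := (PySem.List.length_sorted l (fun x => x) false)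
      rw [h] at this; simpa using this
    have hlen' : n + 1 ≤ (l.erase m).length := by
      have hml : m ∈ l := (PySem.List.mem_sorted l (fun x => x) false m).mp
        (by rw [h]; exact List.mem_cons_self)
      rw [List.length_erase_of_mem hml]
      omega
    rw [Function.iterate_succ_apply, h1, ih (l.erase m) (some m) hlen', h2, h]
    simp

-- Folding the pop step over any list is iterating it length-many times.
theorem pvFoldl_iterate {α : Type} (ys : List α) (st : Option Int × List Int) :
    ys.foldl (fun st _ => pvHeapPopStep st) st = pvHeapPopStep^[ys.length] st := by
  induction ys generalizing st with
  | nil => rfl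
  | cons y t ih => simp [List.foldl_cons, ih, Function.iterate_succ_apply]

-- ===== VERDICT (by name: the statement is the Claim_ definition above) =====
theorem k_smallest_spec : Claim_equal_k_smallest := by
  intro nums k _ hpre
  unfold Spec_k_smallest
  have hk1 : (1:Int) ≤ k := hpre
  have hlen := PySem.List.length_sorted (PySem.Set.ofList nums) (fun x => x) false
  by_cases hlt : ((PySem.Set.ofList nums).length : Int) < k
  · simp only [k_smallest, k_smallest_alt, if_pos hlt]
    rw [if_neg (by omega)]
  · simp only [k_smallest, k_smallest_alt, if_neg hlt]
    rw [if_pos (by omega)]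
    obtain ⟨n, hn⟩ : ∃ n, k.toNat = n + 1 := ⟨k.toNat - 1, by omega⟩
    have hkn : n + 1 ≤ (PySem.Set.ofList nums).length := by omega
    rw [pvFoldl_iterate, List.length_range, hn, pvIterate_sorted n _ none hkn]
    have h0 : (0:Int) ≤ k - 1 := by omega
    have h1 : k - 1 < ((PySem.List.sorted (PySem.Set.ofList nums) (fun x => x) false).length : Int) := by omega
    rw [PySem.List.pyGet?, PySem.List.pyIdx?, if_pos h0, if_pos h1]
    have : (k - 1).toNat = n := by omega
    rw [this]; rfl
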